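-- pv_equiv track=rewrite | github.com/ichbinjon/ProblemSolving | src/skyscanner.py | check_row_x
-- ===== SOURCE A (Python) =====
-- def check_row_x (requiredSeats, row):
--     counter = 0
--     seat_list = []
--     for index, x in enumerate(row):
--         if(x != -1):
--             counter = counter + 1
--             if (counter >= requiredSeats): #appends the last needed seat in the row
--                 seat_list.append(index)
--         else:
--             counter = 0
--     return seat_list
-- ===== SOURCE B (Python) =====
-- def check_row_x(requiredSeats, row):
--     seat_list = []
--     i, n = 0, len(row)
--     while i < n:
--         if row[i] == -1:
--             i += 1
--             continue
--         s = i
--         while i < n and row[i] != -1: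
--             i += 1
--         seat_list.extend(range(s + max(0, requiredSeats - 1), i))
--     return seat_list
-- ===== Notes on version B (the rewrite author's own statement) =====
-- stated objective: simpler
-- what changed: Replaces A's per-seat counter/step loop over enumerate(row) with a run-scan: each maximal run of available seats contributes one contiguous range(start+max(0,requiredSeats-1), end) appended wholesale.
import Mathlib
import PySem

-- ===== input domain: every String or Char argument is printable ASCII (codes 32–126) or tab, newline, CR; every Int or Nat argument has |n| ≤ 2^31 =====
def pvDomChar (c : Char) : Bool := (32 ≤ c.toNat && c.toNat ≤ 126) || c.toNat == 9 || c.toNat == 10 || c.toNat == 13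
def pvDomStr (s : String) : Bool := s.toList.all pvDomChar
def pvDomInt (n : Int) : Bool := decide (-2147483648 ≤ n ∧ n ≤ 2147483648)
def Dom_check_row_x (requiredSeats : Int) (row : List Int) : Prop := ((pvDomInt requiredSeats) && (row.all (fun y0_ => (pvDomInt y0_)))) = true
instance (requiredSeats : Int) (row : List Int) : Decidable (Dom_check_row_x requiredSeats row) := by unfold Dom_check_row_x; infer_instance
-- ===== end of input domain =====

-- B replaces A's per-seat counter loop by a run-scan: each maximal run of available
-- seats contributes one contiguous index range (objective: simpler decomposition).

-- ===== PORT A =====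
def check_row_x (requiredSeats : Int) (row : List Int) : List Int :=
  ((PySem.List.enumerate row 0).foldl
    (fun (st : Int × List Int) (p : Int × Int) =>
      if p.2 ≠ -1 then
        let counter := st.1 + 1
        if counter ≥ requiredSeats then (counter, st.2 ++ [p.1]) else (counter, st.2)
      else (0, st.2))
    (0, [])).2

-- ===== PORT B =====
-- length of the leading run of available (≠ -1) seats: B's inner `while` loop
def runLen : List Int → Nat
  | [] => 0
  | x :: t => if x = -1 then 0 else runLen t + 1

-- B's outer `while` loop: `i` is the absolute index of the first element of `xs`
def altGo (req : Int) (i : Int) (xs : List Int) : List Int :=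
  match xs with
  | [] => []
  | x :: t =>
    if x = -1 then altGo req (i + 1) t
    else
      let L : Nat := runLen (x :: t)
      PySem.List.pyRange (i + max 0 (req - 1)) (i + L) 1 ++ altGo req (i + L) ((x :: t).drop L)
termination_by xs.length
decreasing_by
  all_goals simp_all [runLen]

def check_row_x_alt (requiredSeats : Int) (row : List Int) : List Int :=
  altGo requiredSeats 0 row

-- ===== PRECONDITION & SPEC =====
def Spec_check_row_x (requiredSeats : Int) (row : List Int) (out : List Int) : Prop := out = check_row_x_alt requiredSeats row
instance (requiredSeats : Int) (row : List Int) (out : List Int) : Decidable (Spec_check_row_x requiredSeats row out) := by unfold Spec_check_row_x; infer_instance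

-- ===== CLAIM (what is proved, stated in full; the proofs are below) =====
def Claim_equal_check_row_x : Prop := ∀ (requiredSeats : Int) (row : List Int), Dom_check_row_x requiredSeats row → Spec_check_row_x requiredSeats row (check_row_x requiredSeats row)

-- ===== LEMMAS AND PROOFS =====

-- A's loop, written as recursion producing only the suffix appended from here on
def goA (req : Int) : Int → Int → List Int → List Int
  | _, _, [] => []
  | c, i, x :: t =>
    if x = -1 then goA req 0 (i + 1) t
    else if c + 1 ≥ req then i :: goA req (c + 1) (i + 1) t
    else goA req (c + 1) (i + 1) t

theorem foldA_eq_goA (req : Int) :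
    ∀ (xs : List Int) (c i : Int) (acc : List Int),
      ((PySem.List.enumerate xs i).foldl
        (fun (st : Int × List Int) (p : Int × Int) =>
          if p.2 ≠ -1 then
            let counter := st.1 + 1
            if counter ≥ req then (counter, st.2 ++ [p.1]) else (counter, st.2)
          else (0, st.2))
        (c, acc)).2 = acc ++ goA req c i xs := by
  intro xs
  induction xs with
  | nil => intro c i acc; simp [goA, PySem.List.enumerate_nil]
  | cons x t ih =>
    intro c i acc
    rw [PySem.List.enumerate_cons]
    simp only [List.foldl_cons]
    by_cases hx : x = -1
    · simp only [hx, goA]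
      simp only [show ¬((-1 : Int) ≠ -1) from by simp, if_false]
      exact ih 0 (i + 1) acc
    · simp only [goA, if_neg hx]
      by_cases hc : c + 1 ≥ req
      · simp only [if_pos hc, hx, ne_eq, not_false_iff, if_true]
        rw [ih (c + 1) (i + 1) (acc ++ [i])]
        simp
      · simp only [if_neg hc, hx, ne_eq, not_false_iff, if_true]
        exact ih (c + 1) (i + 1) acc

-- the filtered index list a run of length L contributes when entered with counter c
def runOut (req c i : Int) (L : Nat) : List Int :=
  (List.range L).filterMap (fun (j : Nat) => if c + (j : Int) + 1 ≥ req then some (i + (j : Int)) else none)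

theorem goA_run (req : Int) :
    ∀ (xs : List Int) (c i : Int),
      goA req c i xs =
        runOut req c i (runLen xs) ++
          goA req 0 (i + runLen xs) (xs.drop (runLen xs)) := by
  intro xs
  induction xs with
  | nil => intro c i; simp [goA, runLen, runOut]
  | cons x t ih =>
    intro c i
    by_cases hx : x = -1
    · simp [runLen, runOut, goA, hx]
    · have hrun : runLen (x :: t) = runLen t + 1 := by simp [runLen, hx]
      have hdrop : (x :: t).drop (runLen (x :: t)) = t.drop (runLen t) := by
        rw [hrun]; rfl
      have hout : runOut req c i (runLen (x :: t)) =
          (if c + 1 ≥ req then [i] else []) ++ runOut req (c + 1) (i + 1) (runLen t) := by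
        rw [hrun]
        unfold runOut
        rw [List.range_succ_eq_map, List.filterMap_cons, List.filterMap_map]
        have hfun : ((fun (j : Nat) => if c + (j : Int) + 1 ≥ req then some (i + (j : Int)) else none) ∘ Nat.succ)
            = fun (j : Nat) => if (c + 1) + (j : Int) + 1 ≥ req then some ((i + 1) + (j : Int)) else none := by
          funext j
          simp only [Function.comp_apply, Nat.succ_eq_add_one, Nat.cast_add, Nat.cast_one]
          rw [show c + ((j : Int) + 1) + 1 = (c + 1) + j + 1 by ring,
            show i + ((j : Int) + 1) = (i + 1) + j by ring]
        rw [hfun]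
        by_cases hc : c + 1 ≥ req
        · simp only [Nat.cast_zero, add_zero, if_pos hc]; rfl
        · simp only [Nat.cast_zero, add_zero, if_neg hc]; rfl
      rw [hout, hdrop, hrun,
        show (i + ((runLen t + 1 : Nat) : Int)) = (i + 1) + (runLen t : Int) from by push_cast; ring]
      simp only [goA, if_neg hx]
      by_cases hc : c + 1 ≥ req
      · rw [if_pos hc, if_pos hc, ih (c + 1) (i + 1)]; simp
      · rw [if_neg hc, if_neg hc, ih (c + 1) (i + 1)]; simp

theorem runOut_zero (req : Int) :
    ∀ (L : Nat) (i : Int),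
      runOut req 0 i L = PySem.List.pyRange (i + max 0 (req - 1)) (i + L) 1 := by
  intro L
  induction L with
  | zero =>
    intro i
    simp only [runOut, List.range_zero, List.filterMap_nil, Nat.cast_zero, add_zero]
    rw [PySem.List.pyRange_one_eq_nil (by omega)]
  | succ L ih =>
    intro i
    unfold runOut
    rw [List.range_succ, List.filterMap_append]
    have : (List.range L).filterMap (fun (j : Nat) => if (0 : Int) + (j : Int) + 1 ≥ req then some (i + (j : Int)) else none)
        = runOut req 0 i L := rfl
    rw [this, ih]
    by_cases hc : (L : Int) + 1 ≥ req
    · have h1 : i + max 0 (req - 1) ≤ i + L := by omega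
      rw [show (i + ((L : Nat) + 1 : Nat) : Int) = (i + L) + 1 by push_cast; ring,
        PySem.List.pyRange_one_succ_right h1]
      simp [hc]
    · have h1 : (i + (L : Int) + 1) ≤ i + max 0 (req - 1) := by omega
      rw [show (i + ((L : Nat) + 1 : Nat) : Int) = (i + L) + 1 by push_cast; ring]
      rw [PySem.List.pyRange_one_eq_nil (by omega), PySem.List.pyRange_one_eq_nil (by omega)]
      simp [hc]

theorem goA_zero_eq_altGo (req : Int) :
    ∀ (n : Nat) (xs : List Int), xs.length ≤ n → ∀ i, goA req 0 i xs = altGo req i xs := by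
  intro n
  induction n with
  | zero =>
    intro xs h i
    have hx : xs = [] := by cases xs with
      | nil => rfl
      | cons a t => simp at h
    subst hx; simp [goA, altGo]
  | succ n ih =>
    intro xs h i
    cases xs with
    | nil => simp [goA, altGo]
    | cons x t =>
      by_cases hx : x = -1
      · have h1 : goA req 0 i (x :: t) = goA req 0 (i + 1) t := by
          simp [goA, hx]
        have h2 : altGo req i (x :: t) = altGo req (i + 1) t := by
          rw [altGo]; simp [hx]
        rw [h1, h2]
        exact ih t (by simpa using Nat.lt_succ_iff.mp (Nat.lt_of_lt_of_le (by simp) h)) (i + 1)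
      · have hrun : runLen (x :: t) = runLen t + 1 := by simp [runLen, hx]
        rw [goA_run req (x :: t) 0 i, runOut_zero]
        rw [altGo]
        simp only [if_neg hx]
        congr 1
        apply ih
        rw [hrun]
        simp only [List.length_drop, List.length_cons] at h ⊢
        omega

-- ===== VERDICT (by name: the statement is the Claim_ definition above) =====
theorem check_row_x_spec : Claim_equal_check_row_x := by
  intro req row _
  unfold Spec_check_row_x check_row_x check_row_x_alt
  rw [foldA_eq_goA req row 0 0 []]
  rw [goA_zero_eq_altGo req row.length row le_rfl 0]
  simp
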